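-- pv_equiv track=rewrite | github.com/TTorgersen/dat510-assignments | Assignment2/prng.py | prng
-- ===== SOURCE A (Python) =====
-- def prng(inKab):
--     p = 11
--     q = 23
--     n = p * q
--     kab = inKab
--     bitlist = [None]*20
--     for i in range(len(bitlist)):
--         kab = kab**2
--         nr = kab % n
--         bit = nr & 1 #bitwise operation to get last bit
--         bitlist[i] = bit
--     rk1 = bitlist[0:10]
--     rk2 = bitlist[10:20]
--     return(rk1, rk2)
-- ===== SOURCE B (Python) =====
-- def prng(inKab):
--     # same PRNG bits, but the state is reduced mod n every step, so numbers
--     # stay bounded instead of the unreduced square doubling in size each step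
--     n = 11 * 23
--     bits = []
--     r = inKab % n
--     for _ in range(20):
--         r = (r * r) % n
--         bits.append(r & 1)
--     return (bits[:10], bits[10:])
-- ===== Notes on version B (the rewrite author's own statement) =====
-- stated objective: faster
-- what changed: B reduces the squared state modulo n every iteration (and reduces the seed once up front), so all arithmetic stays on numbers smaller than n instead of A's repeatedly-squared integer that grows to millions of bits; the bits are collected in one appended list and split by slicing.
import Mathlib
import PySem

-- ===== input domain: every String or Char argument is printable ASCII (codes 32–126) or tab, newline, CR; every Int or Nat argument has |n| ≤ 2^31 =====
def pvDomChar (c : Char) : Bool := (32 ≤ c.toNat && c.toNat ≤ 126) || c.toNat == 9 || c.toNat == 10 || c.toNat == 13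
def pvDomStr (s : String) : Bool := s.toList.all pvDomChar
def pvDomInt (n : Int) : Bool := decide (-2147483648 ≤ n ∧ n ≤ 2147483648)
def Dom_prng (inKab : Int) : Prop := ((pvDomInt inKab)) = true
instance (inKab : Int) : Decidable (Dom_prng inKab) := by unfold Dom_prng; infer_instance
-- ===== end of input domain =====

-- B keeps the squared state reduced modulo n each iteration, so all arithmetic stays on
-- small bounded numbers instead of A's unreduced state that doubles in size every squaring (faster).

-- ===== PORT A =====
def prng (inKab : Int) : List Int × List Int :=
  let p : Int := 11
  let q : Int := 23
  let n := p * q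
  -- for i in range(20): kab = kab**2; nr = kab % n; bit = nr & 1; bitlist[i] = bit
  let st := (PySem.List.pyRange 0 20 1).foldl
    (fun (st : Int × List Int) _ =>
      let kab := st.1 ^ 2
      let nr := PySem.Int.mod kab n
      let bit := PySem.Int.band nr 1
      (kab, st.2 ++ [bit])) (inKab, ([] : List Int))
  (PySem.List.slice st.2 (some 0) (some 10), PySem.List.slice st.2 (some 10) (some 20))

-- ===== PORT B =====
def prngBits : Int → Nat → List Int
  | _, 0 => []
  | r, Nat.succ k =>
      let r2 := PySem.Int.mod (r * r) 253
      (PySem.Int.band r2 1) :: prngBits r2 k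

def prng_alt (inKab : Int) : List Int × List Int :=
  let bits := prngBits (PySem.Int.mod inKab 253) 20
  (bits.take 10, bits.drop 10)

-- ===== PRECONDITION & SPEC =====
def Spec_prng (inKab : Int) (out : List Int × List Int) : Prop := out = prng_alt inKab
instance (inKab : Int) (out : List Int × List Int) : Decidable (Spec_prng inKab out) := by unfold Spec_prng; infer_instance

-- ===== CLAIM (what is proved, stated in full; the proofs are below) =====
def Claim_equal_prng : Prop := ∀ (inKab : Int), Dom_prng inKab → Spec_prng inKab (prng inKab)

-- ===== LEMMAS AND PROOFS =====
theorem mod253_sq (a r : Int) (h : PySem.Int.mod a 253 = PySem.Int.mod r 253) :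
    PySem.Int.mod (a ^ 2) 253 = PySem.Int.mod (r * r) 253 := by
  rw [PySem.Int.mod_eq_emod_of_pos (by norm_num)] at h ⊢
  rw [PySem.Int.mod_eq_emod_of_pos (by norm_num)] at h ⊢
  rw [pow_two, Int.mul_emod, h, ← Int.mul_emod]

theorem mod253_idem (x : Int) :
    PySem.Int.mod (PySem.Int.mod x 253) 253 = PySem.Int.mod x 253 := by
  simp [Int.emod_emod_of_dvd]

theorem prngBits_length (r : Int) (k : Nat) : (prngBits r k).length = k := by
  induction k generalizing r with
  | zero => rfl
  | succ k ih => simp [prngBits, ih]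

theorem loop_bits (l : List Int) : ∀ (a r : Int) (acc : List Int),
    PySem.Int.mod a 253 = PySem.Int.mod r 253 →
    (l.foldl (fun (st : Int × List Int) _ =>
        (st.1 ^ 2, st.2 ++ [PySem.Int.band (PySem.Int.mod (st.1 ^ 2) 253) 1])) (a, acc)).2
      = acc ++ prngBits r l.length := by
  induction l with
  | nil => intro a r acc _; simp [prngBits]
  | cons x xs ih =>
    intro a r acc h
    have key := mod253_sq a r h
    have h' : PySem.Int.mod (a ^ 2) 253
        = PySem.Int.mod (PySem.Int.mod (r * r) 253) 253 := by
      rw [key, mod253_idem]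
    simp only [List.foldl_cons]
    rw [ih (a ^ 2) (PySem.Int.mod (r * r) 253) _ h']
    have hb : PySem.Int.band (a ^ 2 % 253) 1 = PySem.Int.band (r * r % 253) 1 := by
      have hk := key
      rw [PySem.Int.mod_eq_emod_of_pos (by norm_num),
        PySem.Int.mod_eq_emod_of_pos (by norm_num)] at hk
      rw [hk]
    simp [prngBits, hb]

theorem prng_spec : Claim_equal_prng := by
  intro inKab _
  unfold Spec_prng prng prng_alt
  have hr : PySem.List.pyRange 0 20 1 =
      [0,1,2,3,4,5,6,7,8,9,10,11,12,13,14,15,16,17,18,19] := by decide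
  simp only [hr]
  have h := loop_bits [0,1,2,3,4,5,6,7,8,9,10,11,12,13,14,15,16,17,18,19]
    inKab (PySem.Int.mod inKab 253) [] (mod253_idem inKab).symm
  simp only [List.length_cons, List.length_nil, List.nil_append] at h
  have hn : (11 : Int) * 23 = 253 := by norm_num
  simp only [hn]
  rw [h]
  norm_num
  constructor
  · rw [PySem.List.slice_to _ (by norm_num)]
    rfl
  · rw [PySem.List.slice_toNat _ (by norm_num) (by norm_num)]
    exact List.take_of_length_le (by simp [prngBits_length])
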